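-- pv_equiv track=rewrite | github.com/PikaBeka/mbNet-tester | create_csv.py | takeName
-- ===== SOURCE A (Python) =====
-- def takeName(possible_header):
--     if possible_header == '[CUDA memcpy DtoH]':
--         return 'DtoH'
--     if possible_header == '[CUDA memcpy HtoD]':
--         return 'HtoD'
--     if possible_header == '[CUDA memset]':
--         return 'memset'
--     word = ''
--     for ch in possible_header:
--         if ch == ' ':  # only one word required
--             word = ''
--             continue
--         if ch == '(' or ch == '<':  # in case we find parameters we stop
--             break
--         word += ch
--     return word
-- ===== SOURCE B (Python) =====
-- def takeName(possible_header):
--     if possible_header == '[CUDA memcpy DtoH]':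
--         return 'DtoH'
--     if possible_header == '[CUDA memcpy HtoD]':
--         return 'HtoD'
--     if possible_header == '[CUDA memset]':
--         return 'memset'
--     i = possible_header.find('(')
--     j = possible_header.find('<')
--     if i == -1:
--         cut = len(possible_header) if j == -1 else j
--     elif j == -1:
--         cut = i
--     else:
--         cut = min(i, j)
--     return possible_header[:cut].rsplit(' ', 1)[-1]
-- ===== Notes on version B (the rewrite author's own statement) =====
-- stated objective: faster
-- what changed: Replaced the per-character accumulator loop with a loop-free decomposition: str.find locates the first '(' or '<' (defaulting to the full length), the prefix is sliced off, and its last space-delimited token is taken with rsplit(' ', 1)[-1].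
import Mathlib
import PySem

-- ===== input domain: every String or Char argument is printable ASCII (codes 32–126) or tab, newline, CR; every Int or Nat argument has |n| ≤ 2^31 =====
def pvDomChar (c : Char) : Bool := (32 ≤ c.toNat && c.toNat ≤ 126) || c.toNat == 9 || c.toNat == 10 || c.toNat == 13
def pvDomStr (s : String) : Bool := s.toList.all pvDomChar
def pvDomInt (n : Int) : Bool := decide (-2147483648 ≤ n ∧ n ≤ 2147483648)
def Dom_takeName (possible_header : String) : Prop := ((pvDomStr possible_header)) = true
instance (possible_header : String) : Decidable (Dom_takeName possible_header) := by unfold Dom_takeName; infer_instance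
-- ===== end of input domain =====

-- B replaces A's character-accumulator loop with find-the-cut, slice, last-token (measured constant-factor faster in Python).

-- ===== PORT A =====
-- A's for-loop: word accumulated as a List Char (Python's `word += ch`, exact on code points);
-- `break` on '(' / '<' returns the current word, ' ' resets it.
def takeNameGo (cs : List Char) (word : List Char) : List Char :=
  match cs with
  | [] => word
  | c :: rest =>
    if c = ' ' then takeNameGo rest []
    else if c = '(' ∨ c = '<' then word
    else takeNameGo rest (word ++ [c])

def takeName (possible_header : String) : String :=
  if possible_header = "[CUDA memcpy DtoH]" then "DtoH"
  else if possible_header = "[CUDA memcpy HtoD]" then "HtoD"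
  else if possible_header = "[CUDA memset]" then "memset"
  else String.ofList (takeNameGo possible_header.toList [])

-- ===== PORT B =====
-- rsplit(' ', 1)[-1] ported by hand (exact): the suffix after the LAST ' ' (whole string if no ' ').
def lastTok (l : List Char) : List Char :=
  (l.reverse.takeWhile (· != ' ')).reverse

def takeName_alt (possible_header : String) : String :=
  if possible_header = "[CUDA memcpy DtoH]" then "DtoH"
  else if possible_header = "[CUDA memcpy HtoD]" then "HtoD"
  else if possible_header = "[CUDA memset]" then "memset"
  else
    let i := PySem.Str.find possible_header "("
    let j := PySem.Str.find possible_header "<"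
    let cut : Int :=
      if i = -1 then (if j = -1 then (possible_header.toList.length : Int) else j)
      else if j = -1 then i else min i j
    String.ofList (lastTok (PySem.Str.slice possible_header none (some cut)).toList)

-- ===== PRECONDITION & SPEC =====
def Spec_takeName (possible_header : String) (out : String) : Prop := out = takeName_alt possible_header
instance (possible_header : String) (out : String) : Decidable (Spec_takeName possible_header out) := by unfold Spec_takeName; infer_instance

-- ===== CLAIM (what is proved, stated in full; the proofs are below) =====
def Claim_equal_takeName : Prop := ∀ (possible_header : String), Dom_takeName possible_header → Spec_takeName possible_header (takeName possible_header)

-- ===== LEMMAS AND PROOFS =====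

-- the char survives A's break test
def pvKeep (c : Char) : Bool := !(c == '(' || c == '<')

-- dropping everything before a space does not change the last token
theorem lastTok_append_space (w t : List Char) : lastTok (w ++ ' ' :: t) = lastTok t := by
  have h : (w ++ ' ' :: t).reverse = t.reverse ++ (' ' :: w.reverse) := by simp
  unfold lastTok
  rw [h, List.takeWhile_append]
  split_ifs with hc
  · rw [List.IsPrefix.eq_of_length (List.takeWhile_prefix _) hc]
    simp
  · rfl

theorem lastTok_no_space (w : List Char) (hw : ' ' ∉ w) : lastTok w = w := by
  have : List.takeWhile (· != ' ') w.reverse = w.reverse := by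
    rw [List.takeWhile_eq_self_iff]
    intro a ha
    simp only [bne_iff_ne, ne_eq]
    exact fun h => hw (by simpa [h] using List.mem_reverse.mp ha)
  simp [lastTok, this]

-- A's loop computes the last space-token of the accumulator followed by the kept prefix
theorem takeNameGo_eq (cs : List Char) : ∀ w, ' ' ∉ w →
    takeNameGo cs w = lastTok (w ++ cs.takeWhile pvKeep) := by
  induction cs with
  | nil => intro w hw; simpa [takeNameGo] using (lastTok_no_space w hw).symm
  | cons c rest ih =>
    intro w hw
    by_cases hsp : c = ' '
    · subst hsp
      rw [takeNameGo, if_pos rfl]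
      have : List.takeWhile pvKeep (' ' :: rest) = ' ' :: rest.takeWhile pvKeep := by
        simp [pvKeep]
      rw [this, lastTok_append_space, ih [] (by simp)]
      simp
    · by_cases hbr : c = '(' ∨ c = '<'
      · rw [takeNameGo, if_neg hsp, if_pos hbr]
        have : List.takeWhile pvKeep (c :: rest) = [] := by
          rcases hbr with h | h <;> simp [pvKeep, h]
        rw [this, List.append_nil, lastTok_no_space w hw]
      · rw [takeNameGo, if_neg hsp, if_neg hbr]
        have hp : pvKeep c = true := by
          simp [pvKeep]; exact ⟨fun h => hbr (Or.inl h), fun h => hbr (Or.inr h)⟩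
        have : List.takeWhile pvKeep (c :: rest) = c :: rest.takeWhile pvKeep := by
          simp [hp]
        rw [this, ih (w ++ [c]) (by simp [hw, Ne.symm hsp])]
        simp

-- idxOf is minimal among indices holding the char (no named Mathlib lemma found for this direction)
theorem idxOf_min (c : Char) : ∀ (l : List Char) (i : Nat) (h : i < l.length), l[i] = c → l.idxOf c ≤ i := by
  intro l
  induction l with
  | nil => intro i h; exact absurd h (by simp)
  | cons a rest ih =>
    intro i h h2
    by_cases ha : a = c
    · simp [List.idxOf_cons, ha]
    · cases i with
      | zero => simp at h2; exact absurd h2 ha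
      | succ j =>
        have hb : (a == c) = false := by simp [ha]
        rw [List.idxOf_cons, hb, cond_false]
        have := ih j (by simpa using h) (by simpa using h2)
        omega

-- find with a single-char needle is idxOf (or -1)
theorem find_singleton (s : List Char) (c : Char) :
    PySem.Chars.find s [c] = if c ∈ s then (s.idxOf c : Int) else -1 := by
  split_ifs with hm
  · have hnn : 0 ≤ PySem.Chars.find s [c] :=
      (PySem.Chars.find_nonneg_iff s [c]).mpr ((List.singleton_infix_iff c s).mpr hm)
    obtain ⟨hpre, hmin⟩ := PySem.Chars.find_spec hnn
    rcases hpre with ⟨t, ht⟩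
    have hlt : (PySem.Chars.find s [c]).toNat < s.length := by
      have := congrArg List.length ht
      simp [List.length_drop] at this
      omega
    have hget : s[(PySem.Chars.find s [c]).toNat] = c := by
      have h' := (List.drop_eq_getElem_cons hlt).symm.trans ht.symm
      exact (List.cons_eq_cons.mp h').1
    have h1 : s.idxOf c ≤ (PySem.Chars.find s [c]).toNat := idxOf_min c s _ hlt hget
    have h2 : ¬ (s.idxOf c < (PySem.Chars.find s [c]).toNat) := by
      intro hlt2
      apply hmin _ hlt2
      have hi := List.idxOf_lt_length_of_mem hm
      have hd : s.drop (s.idxOf c) = c :: s.drop (s.idxOf c + 1) := by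
        rw [List.drop_eq_getElem_cons hi, List.getElem_idxOf hi]
      exact ⟨s.drop (s.idxOf c + 1), by rw [List.singleton_append, hd]⟩
    have : (PySem.Chars.find s [c]).toNat = s.idxOf c := by omega
    omega
  · rw [PySem.Chars.find_eq_neg_one_iff]
    intro hinf
    exact hm ((List.singleton_infix_iff c s).mp hinf)

-- the kept prefix ends exactly at the first '(' or '<'
theorem tw_len (s : List Char) :
    (s.takeWhile pvKeep).length =
      if '(' ∈ s then (if '<' ∈ s then min (s.idxOf '(') (s.idxOf '<') else s.idxOf '(')
      else (if '<' ∈ s then s.idxOf '<' else s.length) := by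
  induction s with
  | nil => simp
  | cons c rest ih =>
    by_cases h1 : c = '('
    · subst h1
      by_cases m2 : '<' ∈ rest <;>
        simp [List.takeWhile_cons, pvKeep, List.idxOf_cons, m2] <;> omega
    · by_cases h2 : c = '<'
      · subst h2
        by_cases m1 : '(' ∈ rest <;>
          simp [List.takeWhile_cons, pvKeep, List.idxOf_cons, m1] <;> omega
      · have hp : pvKeep c = true := by simp [pvKeep, h1, h2]
        have n1 : ¬ ('(' = c) := fun h => h1 h.symm
        have n2 : ¬ ('<' = c) := fun h => h2 h.symm
        have hb1 : (c == '(') = false := by simp [h1]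
        have hb2 : (c == '<') = false := by simp [h2]
        by_cases m1 : '(' ∈ rest <;> by_cases m2 : '<' ∈ rest <;>
          simp [hp, List.idxOf_cons, hb1, hb2, m1, m2, n1, n2, ih] <;> omega

theorem takeName_spec : Claim_equal_takeName := by
  intro ph _
  unfold Spec_takeName takeName takeName_alt
  by_cases e1 : ph = "[CUDA memcpy DtoH]"
  · simp [e1]
  by_cases e2 : ph = "[CUDA memcpy HtoD]"
  · simp [e1, e2]
  by_cases e3 : ph = "[CUDA memset]"
  · simp [e1, e2, e3]
  simp only [e1, e2, e3, if_false]
  have hfd : PySem.Str.find ph "(" = PySem.Chars.find ph.toList ['('] := by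
    simp [PySem.Str.find_eq]
  have hfd2 : PySem.Str.find ph "<" = PySem.Chars.find ph.toList ['<'] := by
    simp [PySem.Str.find_eq]
  have hcut : (if PySem.Str.find ph "(" = -1 then
       (if PySem.Str.find ph "<" = -1 then (ph.toList.length : Int) else PySem.Str.find ph "<")
     else if PySem.Str.find ph "<" = -1 then PySem.Str.find ph "("
     else min (PySem.Str.find ph "(") (PySem.Str.find ph "<")) =
      ((ph.toList.takeWhile pvKeep).length : Int) := by
    rw [hfd, hfd2, find_singleton, find_singleton, tw_len]
    by_cases H1 : '(' ∈ ph.toList <;> by_cases H2 : '<' ∈ ph.toList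
    · have n1 : ¬ ((ph.toList.idxOf '(' : Int) = -1) := by omega
      have n2 : ¬ ((ph.toList.idxOf '<' : Int) = -1) := by omega
      simp [H1, H2, n1, n2]
    · have n1 : ¬ ((ph.toList.idxOf '(' : Int) = -1) := by omega
      simp [H1, H2, n1]
    · have n2 : ¬ ((ph.toList.idxOf '<' : Int) = -1) := by omega
      simp [H1, H2, n2]
    · simp [H1, H2]
  rw [takeNameGo_eq ph.toList [] (by simp), List.nil_append]
  congr 1
  rw [hcut]
  have hsl : (PySem.Str.slice ph none (some ((ph.toList.takeWhile pvKeep).length : Int))).toList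
      = ph.toList.takeWhile pvKeep := by
    rw [PySem.Str.toList_slice, PySem.Chars.slice_eq_listSlice, PySem.List.slice_to_natCast]
    exact (List.prefix_iff_eq_take.mp (List.takeWhile_prefix pvKeep)).symm
  rw [hsl]
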